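-- pv_equiv track=rewrite | github.com/MrCh0p808/StatWoX | jugaad_portable.py | has_sensitive_patterns
-- ===== SOURCE A (Python) =====
-- from typing import List, Dict, Any, Optional, Tuple, Callable
--
-- def has_sensitive_patterns(gitignore_patterns: List[str]) -> bool:
--     """Check if gitignore has sensitive file patterns."""
--     sensitive_indicators = [
--         '.env', 'secret', 'key', 'credential', 'password',
--         'api_key', 'token', 'auth', 'private'
--     ]
--     for pattern in gitignore_patterns:
--         pattern_lower = pattern.lower()
--         if any(indicator in pattern_lower for indicator in sensitive_indicators):
--             return True
--     return False
-- ===== SOURCE B (Python) =====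
-- _SENSITIVE_INDICATORS = [
--     '.env', 'secret', 'key', 'credential', 'password',
--     'api_key', 'token', 'auth', 'private'
-- ]
--
-- def has_sensitive_patterns(gitignore_patterns):
--     """Check if gitignore has sensitive file patterns.
--
--     Builds one newline-joined lowercase blob and searches each indicator once in
--     it (9 searches total) instead of scanning every indicator per pattern.
--     No indicator contains a newline, so a hit never spans two patterns.
--     """
--     blob = "\n".join(p.lower() for p in gitignore_patterns)
--     return any(ind in blob for ind in _SENSITIVE_INDICATORS)
-- ===== Notes on version B (the rewrite author's own statement) =====
-- stated objective: faster
-- what changed: Instead of scanning all 9 indicators against each pattern in an explicit Python loop, B joins the lowercased patterns into one newline-separated blob and runs exactly 9 C-level substring searches on it (correct because no indicator contains a newline, so a match never spans two patterns).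
import Mathlib
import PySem

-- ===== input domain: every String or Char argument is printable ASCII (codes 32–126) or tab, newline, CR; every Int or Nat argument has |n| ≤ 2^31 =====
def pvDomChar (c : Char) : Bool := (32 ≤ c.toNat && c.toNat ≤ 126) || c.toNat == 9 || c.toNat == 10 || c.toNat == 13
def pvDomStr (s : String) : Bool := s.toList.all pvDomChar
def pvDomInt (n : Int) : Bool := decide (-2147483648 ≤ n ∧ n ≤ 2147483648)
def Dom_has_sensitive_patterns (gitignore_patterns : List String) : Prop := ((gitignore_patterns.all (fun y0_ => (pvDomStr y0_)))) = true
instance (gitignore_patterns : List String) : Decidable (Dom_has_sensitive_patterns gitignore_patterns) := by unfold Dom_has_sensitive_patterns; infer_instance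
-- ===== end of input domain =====

-- B builds one newline-joined lowercase blob and searches each indicator once in it,
-- instead of scanning every indicator against every pattern (alternative decomposition).

-- ===== PORT A =====
def pvIndicators : List String :=
  [".env", "secret", "key", "credential", "password",
   "api_key", "token", "auth", "private"]

def has_sensitive_patterns (gitignore_patterns : List String) : Bool :=
  match gitignore_patterns with
  | [] => false
  | p :: rest =>
    let pattern_lower := PySem.Str.lower p
    if pvIndicators.any (fun ind => PySem.Str.isIn ind pattern_lower) then true
    else has_sensitive_patterns rest

-- ===== PORT B =====
def has_sensitive_patterns_alt (gitignore_patterns : List String) : Bool :=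
  let blob := PySem.Str.join "\n" (gitignore_patterns.map PySem.Str.lower)
  pvIndicators.any (fun ind => PySem.Str.isIn ind blob)

-- ===== PRECONDITION & SPEC =====
def Spec_has_sensitive_patterns (gitignore_patterns : List String) (out : Bool) : Prop := out = has_sensitive_patterns_alt gitignore_patterns
instance (gitignore_patterns : List String) (out : Bool) : Decidable (Spec_has_sensitive_patterns gitignore_patterns out) := by unfold Spec_has_sensitive_patterns; infer_instance

-- ===== CLAIM (what is proved, stated in full; the proofs are below) =====
def Claim_equal_has_sensitive_patterns : Prop := ∀ (gitignore_patterns : List String), Dom_has_sensitive_patterns gitignore_patterns → Spec_has_sensitive_patterns gitignore_patterns (has_sensitive_patterns gitignore_patterns)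

-- ===== LEMMAS AND PROOFS =====

-- A is the `any` over patterns of the `any` over indicators.
theorem hsp_eq_any (ps : List String) :
    has_sensitive_patterns ps
      = ps.any (fun p => pvIndicators.any (fun ind => PySem.Str.isIn ind (PySem.Str.lower p))) := by
  induction ps with
  | nil => rfl
  | cons p rest ih =>
      simp only [has_sensitive_patterns, List.any_cons]
      split <;> simp_all

-- A nonempty needle is never found in the empty haystack.
theorem isIn_nil_false (sub : List Char) (h : sub ≠ []) : PySem.Chars.isIn sub [] = false := by
  rw [PySem.Chars.isIn_eq_false_iff]
  intro hs
  exact h (List.eq_nil_of_infix_nil hs)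

-- A newline-free needle is an infix of xs ++ '\n' :: ys iff it is an infix of one side.
theorem infix_split {sub xs ys : List Char} (h : '\n' ∉ sub) :
    sub <:+: (xs ++ '\n' :: ys) ↔ sub <:+: xs ∨ sub <:+: ys := by
  constructor
  · rintro ⟨s, t, hst⟩
    have hlen : s.length + (sub.length + t.length) = xs.length + (ys.length + 1) := by
      have := congrArg List.length hst
      simpa [List.length_append] using this
    by_cases hc : s.length + sub.length ≤ xs.length
    · left
      have htake := congrArg (List.take xs.length) hst
      rw [List.take_append, List.take_append,
          List.take_of_length_le (by omega), List.take_of_length_le (by omega),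
          List.take_left] at htake
      exact ⟨s, t.take (xs.length - (s ++ sub).length), htake⟩
    · by_cases hc2 : xs.length < s.length
      · right
        have hdrop := congrArg (List.drop (xs.length + 1)) hst
        have h0 : xs.length + 1 - s.length = 0 := by omega
        have hrhs : List.drop (xs.length + 1) (xs ++ '\n' :: ys) = ys := by
          rw [List.drop_append]
          simp
        rw [List.drop_append, List.drop_append, h0, List.drop_zero, hrhs] at hdrop
        exact ⟨s.drop (xs.length + 1), t.drop (xs.length + 1 - (s ++ sub).length), hdrop⟩
      · exfalso
        have hL : (s ++ sub ++ t)[xs.length]? = sub[xs.length - s.length]? := by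
          rw [List.getElem?_append_left (by simp [List.length_append]; omega),
              List.getElem?_append_right (by omega)]
        have hR : (xs ++ '\n' :: ys)[xs.length]? = some '\n' := by
          rw [List.getElem?_append_right (le_refl _)]
          simp
        have hq : sub[xs.length - s.length]? = some '\n' := by rw [← hL, hst, hR]
        exact h (List.mem_of_getElem? hq)
  · rintro (⟨s, t, hst⟩ | ⟨s, t, hst⟩)
    · exact ⟨s, t ++ '\n' :: ys, by rw [← hst]; simp⟩
    · exact ⟨xs ++ '\n' :: s, t, by rw [← hst]; simp⟩

-- Searching the newline-joined blob equals searching the parts one by one.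
theorem isIn_joinNL (sub : List Char) (hne : sub ≠ []) (h : '\n' ∉ sub) (ls : List (List Char)) :
    PySem.Chars.isIn sub (PySem.Chars.join ['\n'] ls) = ls.any (fun l => PySem.Chars.isIn sub l) := by
  induction ls with
  | nil => simpa [PySem.Chars.join_nil] using isIn_nil_false sub hne
  | cons l rest ih =>
      cases rest with
      | nil => simp [PySem.Chars.join_singleton]
      | cons l2 rest2 =>
          rw [PySem.Chars.join_cons_cons, List.any_cons, ← ih, Bool.eq_iff_iff,
              PySem.Chars.isIn_iff_infix, Bool.or_eq_true, PySem.Chars.isIn_iff_infix,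
              PySem.Chars.isIn_iff_infix, List.append_assoc]
          exact infix_split h

-- Per indicator: one search in the blob equals the per-pattern searches.
theorem blob_any (ind : String) (hne : ind.toList ≠ []) (hnl : '\n' ∉ ind.toList) (ps : List String) :
    PySem.Str.isIn ind (PySem.Str.join "\n" (ps.map PySem.Str.lower))
      = ps.any (fun p => PySem.Str.isIn ind (PySem.Str.lower p)) := by
  rw [PySem.Str.isIn_eq, PySem.Str.toList_join]
  have hmap : (ps.map PySem.Str.lower).map String.toList
      = ps.map (fun p => PySem.Chars.lower p.toList) := by
    simp [List.map_map, Function.comp, PySem.Str.toList_lower]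
  have hsep : ("\n" : String).toList = ['\n'] := rfl
  rw [hmap, hsep, isIn_joinNL ind.toList hne hnl, List.any_map]
  apply PySem.List.any_congr_mem
  intro p _
  simp [PySem.Str.isIn_eq, PySem.Str.toList_lower]

-- Swap the two `any` quantifiers.
theorem any_swap (ps is : List String) (g : String → String → Bool) :
    ps.any (fun p => is.any (fun i => g p i)) = is.any (fun i => ps.any (fun p => g p i)) := by
  rw [Bool.eq_iff_iff]
  simp only [List.any_eq_true]
  tauto

-- ===== VERDICT (by name: the statement is the Claim_ definition above) =====
theorem has_sensitive_patterns_spec : Claim_equal_has_sensitive_patterns := by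
  intro ps _
  show _ = _
  rw [hsp_eq_any, has_sensitive_patterns_alt,
      any_swap ps pvIndicators (fun p ind => PySem.Str.isIn ind (PySem.Str.lower p))]
  apply (PySem.List.any_congr_mem _).symm
  intro ind hind
  have hprop : ind.toList ≠ [] ∧ '\n' ∉ ind.toList := by
    fin_cases hind <;> decide
  exact blob_any ind hprop.1 hprop.2 ps
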